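-- pv_equiv track=rewrite | github.com/hadiq-io/alula_inspections-ai | backend/nlp/response_generator.py | _identify_x_key
-- ===== SOURCE A (Python) =====
-- from typing import Dict, List, Any, Optional
--
-- def _identify_x_key(keys: List[str], parsed_query: Dict) -> Optional[str]:
--     """Identify the x-axis key from data keys"""
--     # Priority order for x-axis
--     x_candidates = [
--         'month', 'month_name', 'monthname', 'year',
--         'neighborhood', 'neighborhood_ar', 'neighborhood_en',
--         'inspector', 'inspector_name', 'inspectorname',
--         'activity', 'activity_type', 'category',
--         'name', 'label', 'status'
--     ]
--
--     for candidate in x_candidates: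
--         for key in keys:
--             if candidate in key.lower():
--                 return key
--
--     # Fallback to first non-numeric looking key
--     for key in keys:
--         if not any(n in key.lower() for n in ['count', 'total', 'sum', 'avg', 'rate', 'score']):
--             return key
--
--     return keys[0] if keys else None
-- ===== SOURCE B (Python) =====
-- def _identify_x_key(keys, parsed_query):
--     """Identify the x-axis key from data keys (key-major single pass)."""
--     x_candidates = [
--         'month', 'month_name', 'monthname', 'year',
--         'neighborhood', 'neighborhood_ar', 'neighborhood_en',
--         'inspector', 'inspector_name', 'inspectorname',
--         'activity', 'activity_type', 'category',
--         'name', 'label', 'status'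
--     ]
--     sentinel = len(x_candidates)
--
--     def rank(kl):
--         i = 0
--         for c in x_candidates:
--             if c in kl:
--                 return i
--             i += 1
--         return sentinel
--
--     best_key, best_rank = None, sentinel
--     for key in keys:
--         r = rank(key.lower())
--         if r < best_rank:
--             best_key, best_rank = key, r
--
--     if best_key is not None:
--         return best_key
--
--     for key in keys:
--         if not any(n in key.lower() for n in ['count', 'total', 'sum', 'avg', 'rate', 'score']):
--             return key
--
--     return keys[0] if keys else None
-- ===== Notes on version B (the rewrite author's own statement) =====
-- stated objective: alternative
-- what changed: Candidate-major nested scan (for each priority candidate scan all keys) replaced by a key-major single pass: each key gets a rank (index of its first matching candidate, sentinel if none) and one fold over the keys keeps the first key of strictly smallest rank; same fallback cascade.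
import Mathlib
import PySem

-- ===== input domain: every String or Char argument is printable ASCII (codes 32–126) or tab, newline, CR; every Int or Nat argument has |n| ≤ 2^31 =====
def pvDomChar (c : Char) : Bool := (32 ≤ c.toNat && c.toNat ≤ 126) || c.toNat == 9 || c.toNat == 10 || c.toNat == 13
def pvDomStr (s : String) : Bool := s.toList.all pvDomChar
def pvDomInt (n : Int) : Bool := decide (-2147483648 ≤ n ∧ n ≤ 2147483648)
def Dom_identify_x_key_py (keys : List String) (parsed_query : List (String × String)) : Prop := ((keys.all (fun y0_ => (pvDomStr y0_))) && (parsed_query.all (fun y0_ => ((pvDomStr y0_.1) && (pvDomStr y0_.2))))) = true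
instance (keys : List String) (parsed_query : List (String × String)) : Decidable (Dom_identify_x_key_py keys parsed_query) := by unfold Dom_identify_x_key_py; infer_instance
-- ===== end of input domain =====

-- B replaces A's candidate-major nested scan by a key-major single pass keeping the
-- key of smallest candidate-rank (alternative decomposition; same cost class).

-- priority candidates (shared literal of both Pythons)
def pvCands : List String :=
  ["month", "month_name", "monthname", "year",
   "neighborhood", "neighborhood_ar", "neighborhood_en",
   "inspector", "inspector_name", "inspectorname",
   "activity", "activity_type", "category",
   "name", "label", "status"]

-- numeric-looking fallback words (shared literal of both Pythons)
def pvNums : List String := ["count", "total", "sum", "avg", "rate", "score"]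

-- ===== PORT A =====
def identify_x_key_py (keys : List String) (parsed_query : List (String × String)) : Option String :=
  -- for candidate in x_candidates: for key in keys: if candidate in key.lower(): return key
  match pvCands.findSome? (fun c => keys.find? (fun k => PySem.Str.isIn c (PySem.Str.lower k))) with
  | some k => some k
  | none =>
    -- for key in keys: if not any(n in key.lower() for n in [...]): return key
    match keys.find? (fun k => !(pvNums.any (fun n => PySem.Str.isIn n (PySem.Str.lower k)))) with
    | some k => some k
    | none => keys.head?   -- keys[0] if keys else None

-- ===== PORT B =====
-- rank(kl): index of the first candidate contained in kl, sentinel = #candidates if none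
def pvRankGo (kl : String) : List String → Nat → Nat
  | [], i => i
  | c :: cs, i => if PySem.Str.isIn c kl then i else pvRankGo kl cs (i + 1)

def identify_x_key_py_alt (keys : List String) (parsed_query : List (String × String)) : Option String :=
  -- single pass: keep the first key of strictly smallest rank
  let best := keys.foldl
    (fun (st : Option String × Nat) k =>
      let r := pvRankGo (PySem.Str.lower k) pvCands 0
      if r < st.2 then (some k, r) else st)
    (none, pvCands.length)
  match best.1 with
  | some k => some k
  | none =>
    match keys.find? (fun k => !(pvNums.any (fun n => PySem.Str.isIn n (PySem.Str.lower k)))) with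
    | some k => some k
    | none => keys.head?

-- ===== PRECONDITION & SPEC =====
def Spec_identify_x_key_py (keys : List String) (parsed_query : List (String × String)) (out : Option String) : Prop := out = identify_x_key_py_alt keys parsed_query
instance (keys : List String) (parsed_query : List (String × String)) (out : Option String) : Decidable (Spec_identify_x_key_py keys parsed_query out) := by unfold Spec_identify_x_key_py; infer_instance

-- ===== CLAIM (what is proved, stated in full; the proofs are below) =====
def Claim_equal_identify_x_key_py : Prop := ∀ (keys : List String) (parsed_query : List (String × String)), Dom_identify_x_key_py keys parsed_query → Spec_identify_x_key_py keys parsed_query (identify_x_key_py keys parsed_query)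

-- ===== LEMMAS AND PROOFS =====

theorem pvRankGo_eq (kl : String) (cs : List String) (i : Nat) :
    pvRankGo kl cs i = i + cs.findIdx (fun c => PySem.Str.isIn c kl) := by
  induction cs generalizing i with
  | nil => simp [pvRankGo]
  | cons c cs ih =>
    cases hp : PySem.Str.isIn c kl
    all_goals simp at hp
    all_goals simp [pvRankGo, List.findIdx_cons, hp, ih]
    omega

theorem pvFoldlMin_le_init (l : List Nat) (a : Nat) : l.foldl Nat.min a ≤ a := by
  induction l generalizing a with
  | nil => simp
  | cons x l ih => exact le_trans (ih (Nat.min a x)) (Nat.min_le_left a x)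

theorem pvFoldlMin_le_mem (l : List Nat) (x : Nat) (hx : x ∈ l) : ∀ a, l.foldl Nat.min a ≤ x := by
  induction l with
  | nil => cases hx
  | cons y l ih =>
    intro a
    rcases List.mem_cons.1 hx with h | h
    · subst h
      exact le_trans (pvFoldlMin_le_init l (Nat.min a x)) (Nat.min_le_right a x)
    · exact ih h (Nat.min a y)

theorem pvFoldlMin_succ (l : List Nat) (a : Nat) :
    (l.map (fun x => x + 1)).foldl Nat.min (a + 1) = l.foldl Nat.min a + 1 := by
  induction l generalizing a with
  | nil => simp
  | cons x l ih =>
    simp only [List.map_cons, List.foldl_cons]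
    rw [show Nat.min (a + 1) (x + 1) = Nat.min a x + 1 from by
      unfold Nat.min; omega]
    exact ih (Nat.min a x)

theorem pvFind?_congr (l : List String) (p q : String → Bool)
    (h : ∀ a ∈ l, p a = q a) : l.find? p = l.find? q := by
  induction l with
  | nil => rfl
  | cons x l ih =>
    simp only [List.find?_cons]
    rw [h x (List.mem_cons_self ..), ih (fun a ha => h a (List.mem_cons_of_mem _ ha))]

-- the key-major fold computes (first key of globally minimal rank, minimal rank)
theorem pvFoldBest (f : String → Nat) (keys : List String) (b : Option String) (r : Nat) :
    keys.foldl (fun (st : Option String × Nat) k => if f k < st.2 then (some k, f k) else st) (b, r)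
      = ((if (keys.map f).foldl Nat.min r < r
            then keys.find? (fun k => f k == (keys.map f).foldl Nat.min r) else b),
         (keys.map f).foldl Nat.min r) := by
  induction keys generalizing b r with
  | nil => simp
  | cons k ks ih =>
    simp only [List.map_cons, List.foldl_cons, List.find?_cons]
    by_cases h : f k < r
    · rw [if_pos h, ih (some k) (f k)]
      have hmin : Nat.min r (f k) = f k := by
        unfold Nat.min; omega
      rw [hmin]
      have hle : (ks.map f).foldl Nat.min (f k) ≤ f k := pvFoldlMin_le_init _ _
      by_cases he : (ks.map f).foldl Nat.min (f k) = f k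
      · rw [he]
        simp [h]
      · have hlt : (ks.map f).foldl Nat.min (f k) < f k := lt_of_le_of_ne hle he
        rw [if_pos hlt, if_pos (lt_trans hlt h)]
        have : (f k == (ks.map f).foldl Nat.min (f k)) = false := by
          simp; omega
        rw [this]
    · rw [if_neg h, ih b r]
      have hmin : Nat.min r (f k) = r := by
        unfold Nat.min; omega
      rw [hmin]
      by_cases hlt : (ks.map f).foldl Nat.min r < r
      · rw [if_pos hlt, if_pos hlt]
        have hle : (ks.map f).foldl Nat.min r ≤ r := le_of_lt hlt
        have : (f k == (ks.map f).foldl Nat.min r) = false := by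
          simp; omega
        rw [this]
      · rw [if_neg hlt, if_neg hlt]

-- the candidate-major nested scan returns the same "argmin by rank" key
theorem pvFindSome (p : String → String → Bool) (cs keys : List String) :
    cs.findSome? (fun c => keys.find? (fun k => p c k))
      = (if (keys.map (fun k => cs.findIdx (fun c => p c k))).foldl Nat.min cs.length < cs.length
          then keys.find? (fun k => cs.findIdx (fun c => p c k) == (keys.map (fun k => cs.findIdx (fun c => p c k))).foldl Nat.min cs.length)
          else none) := by
  induction cs with
  | nil =>
    simp
  | cons c cs ih =>
    rw [List.findSome?_cons]
    cases hf : keys.find? (fun k => p c k) with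
    | some k0 =>
      have hk0 : k0 ∈ keys := List.mem_of_find?_eq_some hf
      have hp0 : p c k0 = true := List.find?_some hf
      have hidx0 : List.findIdx (fun c' => p c' k0) (c :: cs) = 0 := by
        simp [List.findIdx_cons, hp0]
      have hm : (keys.map (fun k => List.findIdx (fun c' => p c' k) (c :: cs))).foldl Nat.min (c :: cs).length = 0 := by
        have := pvFoldlMin_le_mem (keys.map (fun k => List.findIdx (fun c' => p c' k) (c :: cs)))
          0 (by rw [← hidx0]; exact List.mem_map_of_mem hk0) (c :: cs).length
        omega
      rw [hm, if_pos (by simp)]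
      rw [pvFind?_congr keys _ (fun k => p c k)
        (by intro a _; simp [List.findIdx_cons]; cases hpa : p c a <;> simp), hf]
    | none =>
      have hnone : ∀ k ∈ keys, p c k = false := by
        intro k hk
        have := List.find?_eq_none.1 hf k hk
        simpa using this
      have hmap : keys.map (fun k => List.findIdx (fun c' => p c' k) (c :: cs))
          = (keys.map (fun k => List.findIdx (fun c' => p c' k) cs)).map (fun x => x + 1) := by
        rw [List.map_map]
        refine List.map_congr_left ?_
        intro k hk
        simp [List.findIdx_cons, hnone k hk]
      rw [hmap]
      have hlen : (c :: cs).length = cs.length + 1 := rfl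
      rw [hlen, pvFoldlMin_succ]
      set m := (keys.map (fun k => List.findIdx (fun c' => p c' k) cs)).foldl Nat.min cs.length with hm
      rw [ih]
      by_cases hlt : m < cs.length
      · rw [if_pos hlt, if_pos (by omega)]
        refine pvFind?_congr keys _ _ ?_
        intro k hk
        simp [List.findIdx_cons, hnone k hk]
      · rw [if_neg hlt, if_neg (by omega)]
    
-- ===== VERDICT (by name: the statement is the Claim_ definition above) =====
theorem identify_x_key_py_spec : Claim_equal_identify_x_key_py := by
  intro keys parsed_query _
  show identify_x_key_py keys parsed_query = identify_x_key_py_alt keys parsed_query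
  unfold identify_x_key_py identify_x_key_py_alt
  have hfold : (fun (st : Option String × Nat) k =>
        let r := pvRankGo (PySem.Str.lower k) pvCands 0
        if r < st.2 then (some k, r) else st)
      = (fun (st : Option String × Nat) k =>
        if (fun k => pvCands.findIdx (fun c => PySem.Str.isIn c (PySem.Str.lower k))) k < st.2
        then (some k, (fun k => pvCands.findIdx (fun c => PySem.Str.isIn c (PySem.Str.lower k))) k) else st) := by
    funext st k
    simp only [pvRankGo_eq, Nat.zero_add]
  rw [hfold, pvFoldBest, pvFindSome (fun c k => PySem.Str.isIn c (PySem.Str.lower k))]
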